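-- pv_equiv track=rewrite | github.com/tfcp68/manual-projects | Исходники/Глава 2. Часть 2/Динамическое программирование2/На деревьях/9. Логическое дерево/Python/logical_tree.py | logical_tree
-- ===== SOURCE A (Python) =====
-- from math import inf
--
-- def logical_tree(n: int, v: int, a: list, c: list):
--     x = (n - 1) // 2
--
--     tree = [[inf] * 2 for _ in range(n)]
--     for i in range(1, n + 1):
--         if i > x:
--             tree[i - 1][a[i - 1]] = 0
--
--     for i in range(x, 0, -1):
--         for t1 in range(2):
--             for t2 in range(2):
--                 if a[i - 1] == 1:
--                     t3 = (t1 and t2)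
--                 else:
--                     t3 = (t1 or t2)
--                 if tree[i - 1][t3] > tree[2 * i - 1][t1] + tree[2 * i][t2]:
--                     tree[i - 1][t3] = tree[2 * i - 1][t1] + tree[2 * i][t2]
--
--         if c[i - 1] == 1:
--             for t1 in range(2):
--                 for t2 in range(2):
--                     if 1 - a[i - 1] == 1:
--                         t3 = (t1 and t2)
--                     else:
--                         t3 = (t1 or t2)
--                     if tree[i - 1][t3] > tree[2 * i - 1][t1] + tree[2 * i][t2] + 1:
--                         tree[i - 1][t3] = tree[2 * i - 1][t1] + tree[2 * i][t2] + 1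
--
--     if tree[0][v] == inf:
--         return -1
--
--     return tree[0][v]
-- ===== SOURCE B (Python) =====
-- from math import inf
--
-- def logical_tree(n: int, v: int, a: list, c: list):
--     x = (n - 1) // 2
--
--     def solve(i):
--         if i > x:
--             res = [inf, inf]
--             res[a[i - 1]] = 0
--             return res
--         l = solve(2 * i)
--         r = solve(2 * i + 1)
--         res = [inf, inf]
--         for t1 in range(2):
--             for t2 in range(2):
--                 t3 = (t1 and t2) if a[i - 1] == 1 else (t1 or t2)
--                 res[t3] = min(res[t3], l[t1] + r[t2])
--                 if c[i - 1] == 1: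
--                     t4 = (t1 and t2) if a[i - 1] != 1 else (t1 or t2)
--                     res[t4] = min(res[t4], l[t1] + r[t2] + 1)
--         return res
--
--     root = solve(1)
--     return -1 if root[v] == inf else root[v]
-- ===== Notes on version B (the rewrite author's own statement) =====
-- stated objective: alternative
-- what changed: Replaces the bottom-up mutable-table DP (index loop x..1 over a flat array with two sequential relaxation passes per node) by a top-down recursive post-order solve(i) that returns the [cost_false, cost_true] pair per node and interleaves the gate and flipped-gate relaxations in one pass. Pre_ excludes inputs whose internal-node gate codes a[i-1] lie outside {0,1}: the gate-flip test '1 - a[i-1] == 1' implements negation only for the two documented gate codes (0=OR, 1=AND), and A's value for other codes is an artefact of that expression.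
-- outside the precondition, e.g. on logical_tree(3, 0, [2, -1, 0], [1, 1]): A returns -1, B returns 1
import Mathlib
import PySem

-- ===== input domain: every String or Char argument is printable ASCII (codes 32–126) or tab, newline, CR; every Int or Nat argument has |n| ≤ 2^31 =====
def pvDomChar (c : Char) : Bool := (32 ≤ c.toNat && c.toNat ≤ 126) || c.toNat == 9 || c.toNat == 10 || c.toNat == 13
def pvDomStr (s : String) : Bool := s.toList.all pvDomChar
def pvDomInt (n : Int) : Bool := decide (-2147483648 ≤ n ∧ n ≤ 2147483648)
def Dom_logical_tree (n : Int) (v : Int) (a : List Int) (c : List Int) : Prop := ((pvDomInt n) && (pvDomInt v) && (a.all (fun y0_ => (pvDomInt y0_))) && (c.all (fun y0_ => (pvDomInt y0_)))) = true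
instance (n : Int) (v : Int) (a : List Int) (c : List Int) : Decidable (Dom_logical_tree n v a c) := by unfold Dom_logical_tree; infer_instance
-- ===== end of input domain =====

-- B replaces A's bottom-up mutable-table DP by a recursive post-order solve returning the
-- [cost_false, cost_true] pair per node (alternative decomposition, same asymptotic cost);
-- ∞ is modelled as `none : Option Int`.

-- shared small helpers modelling Python float-inf arithmetic and 2-element-list indexing
-- (Python indices -2..1 select a slot of a length-2 list, with negative wraparound)
def oadd : Option Int → Option Int → Option Int
  | some p, some q => some (p + q)
  | _, _ => none

-- Python `>` where `none` is +inf : inf > inf is False, inf > finite is True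
def ogt : Option Int → Option Int → Bool
  | none, some _ => true
  | some p, some q => decide (q < p)
  | _, _ => false

-- Python min(p, q) (returns p on ties)
def omin (p q : Option Int) : Option Int := if ogt p q then q else p

-- cell[t] for a 2-element cell, Python index semantics for t ∈ {-2,-1,0,1}
def sel (p : Option Int × Option Int) (t : Int) : Option Int :=
  if t == 1 || t == -1 then p.2 else p.1

-- cell[t] = w
def setSel (p : Option Int × Option Int) (t : Int) (w : Option Int) : Option Int × Option Int :=
  if t == 1 || t == -1 then (p.1, w) else (w, p.2)

-- Python `t1 and t2` / `t1 or t2` on ints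
def pyAnd (t1 t2 : Int) : Int := if t1 = 0 then t1 else t2
def pyOr (t1 t2 : Int) : Int := if t1 = 0 then t2 else t1

-- a[j] (inside Pre_ the index is always in range, so the default is never returned)
def aGet (l : List Int) (j : Int) : Int := (PySem.List.pyGet? l j).getD 0

-- tree[j]
def treeGet (tree : List (Option Int × Option Int)) (j : Int) : Option Int × Option Int :=
  (PySem.List.pyGet? tree j).getD (none, none)

-- ===== PORT A =====
-- `if tree[i-1][t3] > rhs: tree[i-1][t3] = rhs`
def relaxA (tree : List (Option Int × Option Int)) (i t3 : Int) (rhs : Option Int) :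
    List (Option Int × Option Int) :=
  if ogt (sel (treeGet tree (i - 1)) t3) rhs then
    tree.set (i - 1).toNat (setSel (treeGet tree (i - 1)) t3 rhs)
  else tree

-- the first double loop over t1, t2 at node i
def pass1A (a : List Int) (tree : List (Option Int × Option Int)) (i : Int) :
    List (Option Int × Option Int) :=
  (PySem.List.pyRange 0 2 1).foldl (fun tree t1 =>
    (PySem.List.pyRange 0 2 1).foldl (fun tree t2 =>
      let t3 := if aGet a (i - 1) == 1 then pyAnd t1 t2 else pyOr t1 t2
      relaxA tree i t3 (oadd (sel (treeGet tree (2 * i - 1)) t1) (sel (treeGet tree (2 * i)) t2)))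
      tree) tree

-- the second double loop (flipped gate, cost + 1), run when c[i-1] == 1
def pass2A (a : List Int) (tree : List (Option Int × Option Int)) (i : Int) :
    List (Option Int × Option Int) :=
  (PySem.List.pyRange 0 2 1).foldl (fun tree t1 =>
    (PySem.List.pyRange 0 2 1).foldl (fun tree t2 =>
      let t3 := if (1 - aGet a (i - 1)) == 1 then pyAnd t1 t2 else pyOr t1 t2
      relaxA tree i t3
        (oadd (oadd (sel (treeGet tree (2 * i - 1)) t1) (sel (treeGet tree (2 * i)) t2)) (some 1)))
      tree) tree

def stepA (a c : List Int) (tree : List (Option Int × Option Int)) (i : Int) :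
    List (Option Int × Option Int) :=
  let tree := pass1A a tree i
  if aGet c (i - 1) == 1 then pass2A a tree i else tree

def logical_tree (n : Int) (v : Int) (a : List Int) (c : List Int) : Int :=
  let x := PySem.Int.floordiv (n - 1) 2
  let tree0 : List (Option Int × Option Int) := List.replicate n.toNat (none, none)
  let tree1 := (PySem.List.pyRange 1 (n + 1) 1).foldl (fun tree i =>
    if i > x then
      tree.set (i - 1).toNat (setSel (treeGet tree (i - 1)) (aGet a (i - 1)) (some 0))
    else tree) tree0
  let tree2 := (PySem.List.pyRange x 0 (-1)).foldl (stepA a c) tree1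
  match sel (treeGet tree2 0) v with
  | none => -1
  | some k => k

-- ===== PORT B =====
-- res[t3] = min(res[t3], rhs)
def relaxB (res : Option Int × Option Int) (t3 : Int) (rhs : Option Int) :
    Option Int × Option Int :=
  setSel res t3 (omin (sel res t3) rhs)

-- recursive post-order solve(i); the `1 ≤ i` guard only makes the recursion total
-- (solve is only ever called with i ≥ 1)
def solveB (x : Int) (a c : List Int) (i : Int) : Option Int × Option Int :=
  if i > x then
    setSel (none, none) (aGet a (i - 1)) (some 0)
  else if h : 1 ≤ i then
    let l := solveB x a c (2 * i)
    let r := solveB x a c (2 * i + 1)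
    (PySem.List.pyRange 0 2 1).foldl (fun res t1 =>
      (PySem.List.pyRange 0 2 1).foldl (fun res t2 =>
        let t3 := if aGet a (i - 1) == 1 then pyAnd t1 t2 else pyOr t1 t2
        let res := relaxB res t3 (oadd (sel l t1) (sel r t2))
        if aGet c (i - 1) == 1 then
          let t4 := if aGet a (i - 1) != 1 then pyAnd t1 t2 else pyOr t1 t2
          relaxB res t4 (oadd (oadd (sel l t1) (sel r t2)) (some 1))
        else res) res) ((none, none) : Option Int × Option Int)
  else (none, none)
termination_by (2 * x + 2 - i).toNat
decreasing_by all_goals omega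

def logical_tree_alt (n : Int) (v : Int) (a : List Int) (c : List Int) : Int :=
  let x := PySem.Int.floordiv (n - 1) 2
  let root := solveB x a c 1
  match sel root v with
  | none => -1
  | some k => k

-- ===== PRECONDITION & SPEC =====
-- Pre_ excludes (besides the inputs where A raises IndexError) inputs whose internal-node gate
-- codes a[j] (j < (n-1)//2) lie outside {0,1}: the flip test `1 - a[i-1] == 1` implements
-- negation only for the documented gate codes 0 (OR) and 1 (AND), and A's value for other
-- codes is an artefact of that expression.
def Pre_logical_tree (n : Int) (v : Int) (a : List Int) (c : List Int) : Prop :=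
  1 ≤ n ∧ n ≤ (a.length : Int) ∧
  PySem.Int.floordiv (n - 1) 2 ≤ (c.length : Int) ∧
  (v = 0 ∨ v = 1 ∨ v = -1 ∨ v = -2) ∧
  (∀ j : Nat, j < n.toNat →
    if (j : Int) < PySem.Int.floordiv (n - 1) 2 then
      a.getD j 0 = 0 ∨ a.getD j 0 = 1
    else
      a.getD j 0 = 0 ∨ a.getD j 0 = 1 ∨ a.getD j 0 = -1 ∨ a.getD j 0 = -2)

instance (n : Int) (v : Int) (a : List Int) (c : List Int) : Decidable (Pre_logical_tree n v a c) := by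
  unfold Pre_logical_tree; infer_instance

def pvWitness_logical_tree : Int × Int × List Int × List Int := (3, 1, [1, 0, 1], [0])

def Spec_logical_tree (n : Int) (v : Int) (a : List Int) (c : List Int) (out : Int) : Prop :=
  out = logical_tree_alt n v a c
instance (n : Int) (v : Int) (a : List Int) (c : List Int) (out : Int) :
    Decidable (Spec_logical_tree n v a c out) := by unfold Spec_logical_tree; infer_instance

-- ===== CLAIM (what is proved, stated in full; the proofs are below) =====
def Claim_equal_logical_tree : Prop := ∀ (n : Int) (v : Int) (a : List Int) (c : List Int),
  Dom_logical_tree n v a c → Pre_logical_tree n v a c →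
  Spec_logical_tree n v a c (logical_tree n v a c)

-- ===== LEMMAS AND PROOFS =====

-- basic cell/option lemmas
theorem setSel_sel (p : Option Int × Option Int) (t : Int) : setSel p t (sel p t) = p := by
  unfold setSel sel; split <;> rfl

theorem omin_none_left (q : Option Int) : omin none q = q := by
  cases q <;> rfl

theorem omin_none_right (p : Option Int) : omin p none = p := by
  cases p <;> rfl

theorem omin_some_some (p q : Int) : omin (some p) (some q) = some (min p q) := by
  simp only [omin, ogt, min_def]
  split_ifs <;> simp_all <;> omega

theorem omin_comm (p q : Option Int) : omin p q = omin q p := by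
  rcases p with _ | p <;> rcases q with _ | q <;>
    simp [omin_none_left, omin_none_right, omin_some_some, min_comm]

theorem omin_assoc (p q r : Option Int) : omin (omin p q) r = omin p (omin q r) := by
  rcases p with _ | p <;> rcases q with _ | q <;> rcases r with _ | r <;>
    simp [omin_none_left, omin_none_right, omin_some_some, min_assoc]

theorem omin_left_comm (p q r : Option Int) : omin p (omin q r) = omin q (omin p r) := by
  rw [← omin_assoc, omin_comm p q, omin_assoc]

-- treeGet via List.getD
theorem treeGet_natCast (t : List (Option Int × Option Int)) (j : Nat) :
    treeGet t (j : Int) = t.getD j (none, none) := by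
  simp [treeGet, PySem.List.pyGet?_natCast, List.getD_eq_getElem?_getD]

theorem treeGet_set_self (t : List (Option Int × Option Int)) (k : Nat)
    (hk : k < t.length) (cell : Option Int × Option Int) :
    treeGet (t.set k cell) (k : Int) = cell := by
  simp [treeGet, PySem.List.pyGet?_natCast, List.getElem?_set_self hk]

theorem treeGet_set_ne (t : List (Option Int × Option Int)) (k : Nat)
    (cell : Option Int × Option Int) (j : Nat) (h : k ≠ j) :
    treeGet (t.set k cell) (j : Int) = treeGet t (j : Int) := by
  simp [treeGet, PySem.List.pyGet?_natCast, List.getElem?_set_ne h]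

-- one relaxation of A = a pure cell update at slot k
theorem relaxA_set (t : List (Option Int × Option Int)) (k : Nat) (t3 : Int) (rhs : Option Int)
    (hk : k < t.length) :
    relaxA t ((k : Int) + 1) t3 rhs = t.set k (relaxB (treeGet t (k : Int)) t3 rhs) := by
  unfold relaxA relaxB omin
  have e : ((k : Int) + 1 - 1) = (k : Int) := by ring
  rw [e]
  have e2 : ((k : Int)).toNat = k := Int.toNat_natCast k
  rw [e2]
  split_ifs with h
  · rfl
  · rw [setSel_sel, treeGet_natCast, List.getD_eq_getElem?_getD,
      List.getElem?_eq_getElem hk]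
    simp [List.set_getElem_self]

-- a nested for-t1/for-t2 loop over range(2) is the flat loop over the four (t1,t2) pairs
theorem nested_eq_flat {α : Type} (f : α → Int → Int → α) (t : α) :
    (PySem.List.pyRange 0 2 1).foldl (fun s t1 =>
      (PySem.List.pyRange 0 2 1).foldl (fun s t2 => f s t1 t2) s) t
    = ([((0 : Int), (0 : Int)), (0, 1), (1, 0), (1, 1)]).foldl (fun s p => f s p.1 p.2) t := rfl

-- A's relaxation loop at node k+1 only rewrites slot k: it equals one pure cell fold
theorem foldA_set (k : Nat) (g : Int → Int → Int) (F : Option Int → Option Int → Option Int)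
    (L R : Option Int × Option Int) :
    ∀ (ps : List (Int × Int)) (t : List (Option Int × Option Int))
      (cur : Option Int × Option Int),
    k < t.length → treeGet t (k : Int) = cur →
    treeGet t ((2 * k + 1 : Nat) : Int) = L → treeGet t ((2 * k + 2 : Nat) : Int) = R →
    ps.foldl (fun tree p => relaxA tree ((k : Int) + 1) (g p.1 p.2)
        (F (sel (treeGet tree ((2 * k + 1 : Nat) : Int)) p.1)
           (sel (treeGet tree ((2 * k + 2 : Nat) : Int)) p.2))) t
      = t.set k (ps.foldl (fun cell p => relaxB cell (g p.1 p.2) (F (sel L p.1) (sel R p.2))) cur) := by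
  intro ps
  induction ps with
  | nil =>
    intro t cur hk hcur _ _
    rw [List.foldl_nil, List.foldl_nil, ← hcur, treeGet_natCast, List.getD_eq_getElem?_getD,
      List.getElem?_eq_getElem hk, Option.getD_some, List.set_getElem_self]
  | cons p ps ih =>
    intro t cur hk hcur hL hR
    rw [List.foldl_cons, List.foldl_cons, hL, hR, relaxA_set t k _ _ hk, hcur,
      ih (t.set k (relaxB cur (g p.1 p.2) (F (sel L p.1) (sel R p.2))))
        (relaxB cur (g p.1 p.2) (F (sel L p.1) (sel R p.2)))
        (by simpa using hk)
        (treeGet_set_self t k hk _)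
        (by rw [treeGet_set_ne t k _ _ (by omega), hL])
        (by rw [treeGet_set_ne t k _ _ (by omega), hR]),
      List.set_set]

-- the pure cell computation of A's first double loop
def cell1A (a : List Int) (k : Nat) (L R cur : Option Int × Option Int) :
    Option Int × Option Int :=
  ([((0 : Int), (0 : Int)), (0, 1), (1, 0), (1, 1)]).foldl (fun cell p =>
    relaxB cell (if aGet a (k : Int) == 1 then pyAnd p.1 p.2 else pyOr p.1 p.2)
      (oadd (sel L p.1) (sel R p.2))) cur

-- the pure cell computation of A's second double loop
def cell2A (a : List Int) (k : Nat) (L R cur : Option Int × Option Int) :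
    Option Int × Option Int :=
  ([((0 : Int), (0 : Int)), (0, 1), (1, 0), (1, 1)]).foldl (fun cell p =>
    relaxB cell (if (1 - aGet a (k : Int)) == 1 then pyAnd p.1 p.2 else pyOr p.1 p.2)
      (oadd (oadd (sel L p.1) (sel R p.2)) (some 1))) cur

theorem pass1A_set (a : List Int) (t : List (Option Int × Option Int)) (k : Nat)
    (L R cur : Option Int × Option Int) (hk : k < t.length)
    (hcur : treeGet t (k : Int) = cur)
    (hL : treeGet t ((2 * k + 1 : Nat) : Int) = L)
    (hR : treeGet t ((2 * k + 2 : Nat) : Int) = R) :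
    pass1A a t ((k : Int) + 1) = t.set k (cell1A a k L R cur) := by
  unfold pass1A
  have e0 : ((k : Int) + 1 - 1) = (k : Int) := by ring
  have d2 : 2 * ((k : Int) + 1) = ((2 * k + 2 : Nat) : Int) := by push_cast; ring
  have d3 : ((2 * k + 2 : Nat) : Int) - 1 = ((2 * k + 1 : Nat) : Int) := by push_cast; ring
  simp only [e0, d2, d3, nested_eq_flat]
  exact foldA_set k (fun t1 t2 => if aGet a (k : Int) == 1 then pyAnd t1 t2 else pyOr t1 t2)
    oadd L R _ t cur hk hcur hL hR

theorem pass2A_set (a : List Int) (t : List (Option Int × Option Int)) (k : Nat)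
    (L R cur : Option Int × Option Int) (hk : k < t.length)
    (hcur : treeGet t (k : Int) = cur)
    (hL : treeGet t ((2 * k + 1 : Nat) : Int) = L)
    (hR : treeGet t ((2 * k + 2 : Nat) : Int) = R) :
    pass2A a t ((k : Int) + 1) = t.set k (cell2A a k L R cur) := by
  unfold pass2A
  have e0 : ((k : Int) + 1 - 1) = (k : Int) := by ring
  have d2 : 2 * ((k : Int) + 1) = ((2 * k + 2 : Nat) : Int) := by push_cast; ring
  have d3 : ((2 * k + 2 : Nat) : Int) - 1 = ((2 * k + 1 : Nat) : Int) := by push_cast; ring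
  simp only [e0, d2, d3, nested_eq_flat]
  exact foldA_set k (fun t1 t2 => if (1 - aGet a (k : Int)) == 1 then pyAnd t1 t2 else pyOr t1 t2)
    (fun A B => oadd (oadd A B) (some 1)) L R _ t cur hk hcur hL hR

-- B's cell computation at an internal node (the body of solveB after unfolding)
def cellB (a c : List Int) (k : Nat) (L R : Option Int × Option Int) : Option Int × Option Int :=
  ([((0 : Int), (0 : Int)), (0, 1), (1, 0), (1, 1)]).foldl (fun res p =>
    let res := relaxB res (if aGet a (k : Int) == 1 then pyAnd p.1 p.2 else pyOr p.1 p.2)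
      (oadd (sel L p.1) (sel R p.2))
    if aGet c (k : Int) == 1 then
      relaxB res (if aGet a (k : Int) != 1 then pyAnd p.1 p.2 else pyOr p.1 p.2)
        (oadd (oadd (sel L p.1) (sel R p.2)) (some 1))
    else res) (none, none)

-- solveB at an internal node computes cellB of its children
theorem solveB_internal (x : Int) (a c : List Int) (k : Nat) (hx : (k : Int) + 1 ≤ x) :
    solveB x a c ((k : Int) + 1)
      = cellB a c k (solveB x a c (2 * ((k : Int) + 1))) (solveB x a c (2 * ((k : Int) + 1) + 1)) := by
  rw [solveB, if_neg (by omega), dif_pos (by omega)]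
  have e0 : ((k : Int) + 1 - 1) = (k : Int) := by ring
  simp only [e0, nested_eq_flat]
  rfl

-- the cell-level heart: A's two sequential passes equal B's interleaved pass
theorem cell_eq (a c : List Int) (k : Nat) (L R : Option Int × Option Int)
    (hga : aGet a (k : Int) = 0 ∨ aGet a (k : Int) = 1) :
    (if aGet c (k : Int) == 1 then cell2A a k L R (cell1A a k L R (none, none))
     else cell1A a k L R (none, none)) = cellB a c k L R := by
  obtain ⟨l0, l1⟩ := L
  obtain ⟨r0, r1⟩ := R
  unfold cell1A cell2A cellB
  by_cases hf : aGet c (k : Int) = 1 <;> rcases hga with hg | hg <;>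
    simp [hf, hg, relaxB, sel, setSel, pyAnd, pyOr,
      omin_none_left, omin_none_right, omin_comm, omin_assoc, omin_left_comm]

-- the per-node equality: one iteration of A's main loop writes exactly solveB at slot k
theorem stepA_eq (a c : List Int) (x : Int) (t : List (Option Int × Option Int)) (k : Nat)
    (hk : 2 * k + 2 < t.length)
    (hx : (k : Int) + 1 ≤ x)
    (h0 : treeGet t (k : Int) = (none, none))
    (hL : treeGet t ((2 * k + 1 : Nat) : Int) = solveB x a c (2 * ((k : Int) + 1)))
    (hR : treeGet t ((2 * k + 2 : Nat) : Int) = solveB x a c (2 * ((k : Int) + 1) + 1))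
    (hga : aGet a (k : Int) = 0 ∨ aGet a (k : Int) = 1) :
    stepA a c t ((k : Int) + 1) = t.set k (solveB x a c ((k : Int) + 1)) := by
  have hklt : k < t.length := by omega
  have e0 : ((k : Int) + 1 - 1) = (k : Int) := by ring
  set L := solveB x a c (2 * ((k : Int) + 1)) with hLdef
  set R := solveB x a c (2 * ((k : Int) + 1) + 1) with hRdef
  unfold stepA
  simp only [e0]
  rw [pass1A_set a t k L R (none, none) hklt h0 hL hR]
  rw [solveB_internal x a c k hx, ← hLdef, ← hRdef, ← cell_eq a c k L R hga]
  by_cases hf : aGet c (k : Int) = 1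
  · rw [if_pos (by simp [hf]), if_pos (by simp [hf]),
      pass2A_set a _ k L R (cell1A a k L R (none, none))
        (by simpa using hklt)
        (treeGet_set_self t k hklt _)
        (by rw [treeGet_set_ne t k _ _ (by omega), hL])
        (by rw [treeGet_set_ne t k _ _ (by omega), hR]),
      List.set_set]
  · rw [if_neg (by simp [hf]), if_neg (by simp [hf])]

-- characterisation of the initialisation loop
theorem initA_spec (n x : Int) (a : List Int) (hx0 : 0 ≤ x) (m : Nat) (hm : (m : Int) ≤ n) :
    (((PySem.List.pyRange 1 ((m : Int) + 1) 1).foldl (fun tree i =>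
        if i > x then
          tree.set (i - 1).toNat (setSel (treeGet tree (i - 1)) (aGet a (i - 1)) (some 0))
        else tree) (List.replicate n.toNat ((none, none) : Option Int × Option Int))).length
      = n.toNat) ∧
    (∀ j : Nat, j < n.toNat →
      ((PySem.List.pyRange 1 ((m : Int) + 1) 1).foldl (fun tree i =>
        if i > x then
          tree.set (i - 1).toNat (setSel (treeGet tree (i - 1)) (aGet a (i - 1)) (some 0))
        else tree) (List.replicate n.toNat ((none, none) : Option Int × Option Int))).getD j (none, none)
      = if x ≤ (j : Int) ∧ (j : Int) < (m : Int) then setSel (none, none) (aGet a (j : Int)) (some 0)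
        else (none, none)) := by
  induction m with
  | zero =>
    rw [PySem.List.pyRange_one_eq_nil (by norm_num)]
    constructor
    · simp
    · intro j hj
      simp only [List.foldl_nil]
      rw [List.getD_eq_getElem?_getD, List.getElem?_replicate]
      simp only [hj, if_pos]
      simp
  | succ m ih =>
    obtain ⟨ihlen, ihget⟩ := ih (by push_cast; omega)
    have hsplit : PySem.List.pyRange 1 ((↑(m + 1) : Int) + 1) 1
        = PySem.List.pyRange 1 ((m : Int) + 1) 1 ++ [(m : Int) + 1] := by
      have e : ((↑(m + 1) : Int) + 1) = ((m : Int) + 1) + 1 := by push_cast; ring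
      rw [e, PySem.List.pyRange_one_succ_right (by omega)]
    rw [hsplit, List.foldl_append]
    simp only [List.foldl_cons, List.foldl_nil]
    set told := (PySem.List.pyRange 1 ((m : Int) + 1) 1).foldl (fun tree i =>
        if i > x then
          tree.set (i - 1).toNat (setSel (treeGet tree (i - 1)) (aGet a (i - 1)) (some 0))
        else tree) (List.replicate n.toNat ((none, none) : Option Int × Option Int)) with htold
    have hmn : m < n.toNat := by omega
    by_cases hgt : (m : Int) + 1 > x
    · rw [if_pos hgt]
      have e1 : ((m : Int) + 1 - 1) = (m : Int) := by ring
      have e2 : ((m : Int)).toNat = m := Int.toNat_natCast m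
      rw [e1, e2]
      have hcell : treeGet told (m : Int) = (none, none) := by
        rw [treeGet_natCast, ihget m hmn]
        have : ¬ ((x ≤ (m : Int)) ∧ ((m : Int) < (m : Int))) := by omega
        simp [this]
      rw [hcell]
      refine ⟨by simp [ihlen], ?_⟩
      intro j hj
      rcases eq_or_ne j m with rfl | hne
      · rw [List.getD_eq_getElem?_getD, List.getElem?_set_self (by omega), Option.getD_some]
        have hc : x ≤ (j : Int) ∧ (j : Int) < (↑(j + 1) : Int) := by push_cast; omega
        rw [if_pos hc]
      · rw [List.getD_eq_getElem?_getD, List.getElem?_set_ne (by omega),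
          ← List.getD_eq_getElem?_getD, ihget j hj]
        have hiff : ((j : Int) < (m : Int)) = ((j : Int) < (↑(m + 1) : Int)) := by
          apply propext; constructor <;> intro h <;> push_cast at * <;> omega
        simp only [hiff]
    · rw [if_neg hgt]
      refine ⟨ihlen, ?_⟩
      intro j hj
      rw [ihget j hj]
      have : ((x ≤ (j : Int)) ∧ ((j : Int) < (m : Int)))
           = ((x ≤ (j : Int)) ∧ ((j : Int) < (↑(m + 1) : Int))) := by
        apply propext; constructor <;> intro h <;> push_cast at * <;> omega
      simp only [this]

-- the main loop establishes tree[j] = solveB (j+1) everywhere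
theorem loopA_spec (a c : List Int) (n x : Int) (hx : 2 * x + 1 ≤ n)
    (hpre : ∀ j : Nat, (j : Int) < x → aGet a (j : Int) = 0 ∨ aGet a (j : Int) = 1) :
    ∀ k : Nat, (k : Int) ≤ x → ∀ t : List (Option Int × Option Int), t.length = n.toNat →
    (∀ j : Nat, j < n.toNat →
      t.getD j (none, none) = if k ≤ j then solveB x a c ((j : Int) + 1) else (none, none)) →
    ∀ j : Nat, j < n.toNat →
      ((PySem.List.pyRange (k : Int) 0 (-1)).foldl (stepA a c) t).getD j (none, none)
        = solveB x a c ((j : Int) + 1) := by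
  intro k
  induction k with
  | zero =>
    intro _ t _ hinv j hj
    rw [PySem.List.pyRange_neg_one_eq_nil (by norm_num), List.foldl_nil, hinv j hj,
      if_pos (Nat.zero_le j)]
  | succ k ih =>
    intro hkx t hlen hinv j hj
    have hcons : PySem.List.pyRange (↑(k + 1) : Int) 0 (-1)
        = (↑(k + 1) : Int) :: PySem.List.pyRange ((↑(k + 1) : Int) - 1) 0 (-1) :=
      PySem.List.pyRange_neg_one_cons (by push_cast; omega)
    have e1 : ((↑(k + 1) : Int) - 1) = (k : Int) := by push_cast; ring
    have e2 : (↑(k + 1) : Int) = (k : Int) + 1 := by push_cast; ring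
    rw [hcons, e1, e2, List.foldl_cons]
    have hkx' : (k : Int) + 1 ≤ x := by omega
    have hklen : 2 * k + 2 < t.length := by
      have : 2 * ((k : Int) + 1) + 1 ≤ n := by omega
      omega
    have hstep : stepA a c t ((k : Int) + 1) = t.set k (solveB x a c ((k : Int) + 1)) := by
      apply stepA_eq a c x t k hklen hkx'
      · rw [treeGet_natCast, hinv k (by omega)]
        have : ¬ (k + 1 ≤ k) := by omega
        simp [this]
      · rw [treeGet_natCast, hinv (2 * k + 1) (by omega), if_pos (by omega)]
        congr 1 <;> push_cast <;> ring
      · rw [treeGet_natCast, hinv (2 * k + 2) (by omega), if_pos (by omega)]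
        congr 1 <;> push_cast <;> ring
      · exact hpre k (by omega)
    rw [hstep]
    apply ih (by omega) _ (by simp [hlen])
    intro j' hj'
    rcases eq_or_ne j' k with rfl | hne
    · rw [List.getD_eq_getElem?_getD, List.getElem?_set_self (by omega), Option.getD_some,
        if_pos (le_refl j')]
    · rw [List.getD_eq_getElem?_getD, List.getElem?_set_ne (Ne.symm hne),
        ← List.getD_eq_getElem?_getD, hinv j' hj']
      have : (k + 1 ≤ j') = (k ≤ j') := by
        apply propext; constructor <;> intro h <;> omega
      simp only [this]
    · exact hj

-- aGet in terms of List.getD, to use Pre_'s value constraints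
theorem aGet_natCast (l : List Int) (j : Nat) : aGet l (j : Int) = l.getD j 0 := by
  simp [aGet, PySem.List.pyGet?_natCast, List.getD_eq_getElem?_getD]

theorem treeGet_zero (t : List (Option Int × Option Int)) :
    treeGet t (0 : Int) = t.getD 0 (none, none) := by
  simpa using treeGet_natCast t 0

-- ===== VERDICT (by name: the statement is the Claim_ definition above) =====
theorem logical_tree_spec : Claim_equal_logical_tree := by
  intro n v a c _ hpre
  obtain ⟨hn1, hna, hnc, hv, hvals⟩ := hpre
  simp only [Spec_logical_tree, logical_tree, logical_tree_alt]
  set x := PySem.Int.floordiv (n - 1) 2 with hxdef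
  have hxb : x * 2 ≤ n - 1 ∧ n - 1 < (x + 1) * 2 :=
    (PySem.Int.floordiv_eq_iff_of_pos (by norm_num)).mp hxdef.symm
  have hx0 : 0 ≤ x := by omega
  have hxn : 2 * x + 1 ≤ n := by omega
  have hNn : ((n.toNat : Int)) = n := Int.toNat_of_nonneg (by omega)
  have hXx : ((x.toNat : Int)) = x := Int.toNat_of_nonneg hx0
  -- the initialisation loop
  obtain ⟨hlen1, hget1⟩ := initA_spec n x a hx0 n.toNat (by omega)
  rw [hNn] at hlen1 hget1
  -- the main loop, starting from the initialised tree
  have hloop := loopA_spec a c n x hxn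
    (fun j hj => by
      rw [aGet_natCast]
      have hjn : j < n.toNat := by omega
      have := hvals j hjn
      rw [if_pos (by omega)] at this
      exact this)
    x.toNat (by omega) _ hlen1
    (fun j hj => by
      rw [hget1 j hj]
      by_cases hle : x ≤ (j : Int)
      · rw [if_pos ⟨hle, by omega⟩, if_pos (by omega)]
        rw [solveB, if_pos (by omega), show ((j : Int) + 1 - 1) = (j : Int) from by ring]
      · rw [if_neg (by omega), if_neg (by omega)])
    0 (by omega)
  rw [hXx] at hloop
  simp only [Nat.cast_zero, zero_add] at hloop
  rw [treeGet_zero, hloop]
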